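-- pv_equiv track=rewrite | github.com/vamosviendo/nandotools | repr.py | reprlist
-- ===== SOURCE A (Python) =====
-- def reprlist(lista):
--     ''' Devuelve la representación de una lista'''
--     r = '['
--     for item in lista:
--         r += f'{item}'
--         if lista.index(item) < len(lista)-1:
--             r += ', '
--     r += ']'
--     return r
-- ===== SOURCE B (Python) =====
-- def reprlist(lista):
--     ''' Devuelve la representación de una lista'''
--     return '[' + ', '.join(f'{item}' for item in lista) + ']'
-- ===== Notes on version B (the rewrite author's own statement) =====
-- stated objective: simpler
-- what changed: B builds the representation with a single ', '.join over the items instead of A's loop that calls list.index on each element to decide the separator.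
-- intended difference: On lists whose last element also occurs earlier, A's list.index comparison misfires and A returns a trailing ', ' before the closing bracket (e.g. '[1, 1, ]'), while B returns the intended '[1, 1]' with no trailing comma. — e.g. on reprlist([1, 1]): A returns "[1, 1, ]", B returns "[1, 1]"
import Mathlib
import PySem

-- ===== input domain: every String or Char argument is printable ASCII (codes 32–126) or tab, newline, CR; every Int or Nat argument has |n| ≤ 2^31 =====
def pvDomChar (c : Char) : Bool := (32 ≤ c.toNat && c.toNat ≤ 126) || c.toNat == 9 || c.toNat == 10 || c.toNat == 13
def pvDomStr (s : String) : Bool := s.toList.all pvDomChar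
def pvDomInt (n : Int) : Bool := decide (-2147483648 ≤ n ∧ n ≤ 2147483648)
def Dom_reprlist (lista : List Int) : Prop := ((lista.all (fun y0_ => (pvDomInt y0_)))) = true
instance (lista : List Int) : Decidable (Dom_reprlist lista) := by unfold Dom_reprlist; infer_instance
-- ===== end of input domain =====

-- B builds the string with one ', '.join instead of A's per-element list.index
-- separator logic (simpler); where A's index logic misfires (last element repeated
-- earlier) B returns the intended representation without the trailing comma.

-- ===== PORT A =====
def reprlist (lista : List Int) : String :=
  let r := "["
  let r := lista.foldl (fun r item =>
    let r' := r ++ PySem.Int.toStr item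
    if (((PySem.List.index? lista item).getD 0 : Int)) < PySem.List.len lista - 1 then
      r' ++ ", "
    else r') r
  r ++ "]"

-- ===== PORT B =====
def reprlist_alt (lista : List Int) : String :=
  "[" ++ PySem.Str.join ", " (lista.map (fun item => PySem.Int.toStr item)) ++ "]"

-- ===== PRECONDITION & SPEC =====
-- On lists whose last element also occurs earlier, A's list.index comparison
-- misfires and A returns a trailing ', ' before the closing bracket
-- (e.g. '[1, 1, ]'), while B returns the intended '[1, 1]'.
def D_reprlist (lista : List Int) : Prop :=
  lista ≠ [] ∧ lista.getLastD 0 ∈ lista.dropLast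
instance (lista : List Int) : Decidable (D_reprlist lista) := by unfold D_reprlist; infer_instance

def Spec_reprlist (lista : List Int) (out : String) : Prop := ¬ D_reprlist lista → out = reprlist_alt lista
instance (lista : List Int) (out : String) : Decidable (Spec_reprlist lista out) := by unfold Spec_reprlist; infer_instance

def pvDiffWitness_reprlist : List Int := [1, 1]
def pvDiffWitnessOut_reprlist : String × String := ("[1, 1, ]", "[1, 1]")

-- ===== CLAIM (what is proved, stated in full; the proofs are below) =====
def Claim_unchanged_reprlist : Prop := ∀ (lista : List Int), Dom_reprlist lista → Spec_reprlist lista (reprlist lista)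
def Claim_changed_reprlist : Prop := Dom_reprlist (pvDiffWitness_reprlist) ∧ D_reprlist (pvDiffWitness_reprlist) ∧ reprlist (pvDiffWitness_reprlist) = pvDiffWitnessOut_reprlist.1 ∧ reprlist_alt (pvDiffWitness_reprlist) = pvDiffWitnessOut_reprlist.2 ∧ pvDiffWitnessOut_reprlist.1 ≠ pvDiffWitnessOut_reprlist.2
def Claim_exact_reprlist : Prop := ∀ (lista : List Int), Dom_reprlist lista → D_reprlist lista → reprlist lista ≠ reprlist_alt lista

-- ===== LEMMAS AND PROOFS =====

-- A's loop at the character level: each item contributes its digits plus (conditionally) ", ".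
theorem reprlist_foldl_toList (p : Int → Prop) [DecidablePred p] :
    ∀ (l : List Int) (r : String),
      (l.foldl (fun r item =>
        if p item then r ++ PySem.Int.toStr item ++ ", "
        else r ++ PySem.Int.toStr item) r).toList
      = r.toList ++ l.flatMap
          (fun x => PySem.Int.toChars x ++ if p x then [',', ' '] else []) := by
  intro l
  induction l with
  | nil => intro r; simp
  | cons x xs ih =>
    intro r
    by_cases hx : p x <;>
      simp [hx, ih, String.toList_append, PySem.Int.toList_toStr]

-- join-with-separator of a snoc, as a flatMap of "piece ++ sep" over the init
theorem join_concat (sep : List Char) :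
    ∀ (l : List (List Char)) (a : List Char),
      PySem.Chars.join sep (l ++ [a]) = (l.flatMap (fun x => x ++ sep)) ++ a := by
  intro l
  induction l with
  | nil => intro a; simp [PySem.Chars.join_singleton]
  | cons x xs ih =>
    intro a
    obtain ⟨q, rest, hq⟩ : ∃ q rest, xs ++ [a] = q :: rest := by
      cases xs <;> exact ⟨_, _, rfl⟩
    calc PySem.Chars.join sep (x :: xs ++ [a])
        = x ++ sep ++ PySem.Chars.join sep (xs ++ [a]) := by
          rw [List.cons_append, hq, PySem.Chars.join_cons_cons, ← hq]
      _ = ((x :: xs).flatMap (fun x => x ++ sep)) ++ a := by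
          rw [ih a]; simp

-- the first index of an element of `take n l` is < n
theorem index?_lt_of_mem_take :
    ∀ (l : List Int) (n : Nat) (x : Int), x ∈ l.take n →
      ∃ k, PySem.List.index? l x = some k ∧ k < n := by
  intro l
  induction l with
  | nil => intro n x hx; simp at hx
  | cons y ys ih =>
    intro n x hx
    cases n with
    | zero => simp at hx
    | succ m =>
      by_cases hxy : y = x
      · subst hxy
        exact ⟨0, PySem.List.index?_cons_self _ _, Nat.succ_pos m⟩
      · simp at hx
        rcases hx with hx | hx
        · exact absurd hx.symm hxy
        · obtain ⟨k, hk, hkn⟩ := ih m x hx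
          refine ⟨k + 1, ?_, Nat.succ_lt_succ hkn⟩
          rw [PySem.List.index?_cons_of_ne ys hxy, hk]; rfl

-- A's comma condition holds for every element occurring before the last position
theorem cond_true_of_mem_init (init : List Int) (a x : Int) (hx : x ∈ init) :
    (((PySem.List.index? (init ++ [a]) x).getD 0 : Int))
      < PySem.List.len (init ++ [a]) - 1 := by
  obtain ⟨k, hk, hkn⟩ := index?_lt_of_mem_take (init ++ [a]) init.length x
    (by rwa [List.take_left])
  rw [hk]
  simp only [PySem.List.len_eq, List.length_append, List.length_cons, List.length_nil,
    Option.getD_some]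
  push_cast
  omega

-- … and fails on the last element exactly when it does not occur earlier
theorem cond_false_last (init : List Int) (a : Int) (ha : a ∉ init) :
    ¬ ((((PySem.List.index? (init ++ [a]) a).getD 0 : Int))
        < PySem.List.len (init ++ [a]) - 1) := by
  rw [PySem.List.index?_append_singleton_self init a ha]
  simp only [PySem.List.len_eq, List.length_append, List.length_cons, List.length_nil,
    Option.getD_some]
  push_cast
  omega

-- A's output at the character level, for a non-empty list init ++ [a]
theorem reprlist_toList_concat (init : List Int) (a : Int) :
    (reprlist (init ++ [a])).toList
      = ['['] ++ (init.flatMap (fun x => PySem.Int.toChars x ++ [',', ' '])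
          ++ (PySem.Int.toChars a ++
              if a ∈ init then [',', ' '] else []))
        ++ [']'] := by
  simp only [reprlist, String.toList_append]
  rw [reprlist_foldl_toList
    (fun item => (((PySem.List.index? (init ++ [a]) item).getD 0 : Int))
      < PySem.List.len (init ++ [a]) - 1)]
  rw [List.flatMap_append, List.flatMap_singleton]
  have h1 : init.flatMap
        (fun x => PySem.Int.toChars x ++
          if (((PySem.List.index? (init ++ [a]) x).getD 0 : Int))
              < PySem.List.len (init ++ [a]) - 1 then [',', ' '] else [])
      = init.flatMap (fun x => PySem.Int.toChars x ++ [',', ' ']) := by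
    exact List.flatMap_congr (fun x hx => by
      rw [if_pos (cond_true_of_mem_init init a x hx)])
  have h2 : (if (((PySem.List.index? (init ++ [a]) a).getD 0 : Int))
        < PySem.List.len (init ++ [a]) - 1 then ([',', ' '] : List Char) else [])
      = if a ∈ init then [',', ' '] else [] := by
    by_cases hm : a ∈ init
    · rw [if_pos hm, if_pos (cond_true_of_mem_init init a a hm)]
    · rw [if_neg hm, if_neg (cond_false_last init a hm)]
  rw [h1, h2]
  rfl

-- B's output at the character level, for a non-empty list init ++ [a]
theorem reprlist_alt_toList_concat (init : List Int) (a : Int) :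
    (reprlist_alt (init ++ [a])).toList
      = ['['] ++ (init.flatMap (fun x => PySem.Int.toChars x ++ [',', ' '])
          ++ PySem.Int.toChars a) ++ [']'] := by
  simp only [reprlist_alt, String.toList_append]
  rw [PySem.Str.toList_join, List.map_map]
  simp only [Function.comp_def, PySem.Int.toList_toStr]
  have hmapl : (init ++ [a]).map (fun x => PySem.Int.toChars x)
      = init.map PySem.Int.toChars ++ [PySem.Int.toChars a] := by simp
  rw [hmapl]
  have hsep : (", " : String).toList = [',', ' '] := rfl
  rw [hsep, join_concat, List.flatMap_map]
  rfl

-- D_ on a non-empty list = the last element occurs earlier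
theorem D_concat_iff (init : List Int) (a : Int) :
    D_reprlist (init ++ [a]) ↔ a ∈ init := by
  unfold D_reprlist
  constructor
  · rintro ⟨-, h⟩
    rwa [List.getLastD_concat, List.dropLast_concat] at h
  · intro h
    exact ⟨by simp, by rwa [List.getLastD_concat, List.dropLast_concat]⟩

-- ===== VERDICT (by name: the statement is the Claim_ definition above) =====
theorem reprlist_spec : Claim_unchanged_reprlist := by
  intro lista _ hnd
  rcases List.eq_nil_or_concat lista with rfl | ⟨init, a, rfl⟩
  · decide
  · have hmem : a ∉ init := fun h => hnd (by
      rw [List.concat_eq_append]; exact (D_concat_iff init a).mpr h)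
    apply String.toList_inj.mp
    rw [List.concat_eq_append, reprlist_toList_concat, reprlist_alt_toList_concat,
      if_neg hmem, List.append_nil]

theorem reprlist_changed : Claim_changed_reprlist := by
  unfold Claim_changed_reprlist; decide

theorem reprlist_tight : Claim_exact_reprlist := by
  intro lista _ hd heq
  rcases List.eq_nil_or_concat lista with rfl | ⟨init, a, rfl⟩
  · exact hd.1 rfl
  · have hmem : a ∈ init := (D_concat_iff init a).mp (by rwa [List.concat_eq_append] at hd)
    have h := congrArg String.toList heq
    rw [List.concat_eq_append, reprlist_toList_concat, reprlist_alt_toList_concat,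
      if_pos hmem] at h
    have := congrArg List.length h
    simp [List.length_append] at this
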